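-- pv_equiv track=rewrite | github.com/Maxic/advent2015 | day5/problem1.py | contains_three_vowels
-- ===== SOURCE A (Python) =====
-- def contains_three_vowels(string):
--     vowels = 'aeiou'
--     num_vowels = 0
--
--     for char in string:
--         if vowels.__contains__(char):
--             num_vowels += 1
--         if num_vowels >= 3:
--             return True
--
--     return False
-- ===== SOURCE B (Python) =====
-- def contains_three_vowels(string):
--     return sum(string.count(v) for v in 'aeiou') >= 3
-- ===== Notes on version B (the rewrite author's own statement) =====
-- stated objective: simpler
-- what changed: Replaces the character-by-character scan with an early-exit counter by five targeted string.count scans (one per vowel) whose total is compared to 3 in a single expression.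
import Mathlib
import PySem

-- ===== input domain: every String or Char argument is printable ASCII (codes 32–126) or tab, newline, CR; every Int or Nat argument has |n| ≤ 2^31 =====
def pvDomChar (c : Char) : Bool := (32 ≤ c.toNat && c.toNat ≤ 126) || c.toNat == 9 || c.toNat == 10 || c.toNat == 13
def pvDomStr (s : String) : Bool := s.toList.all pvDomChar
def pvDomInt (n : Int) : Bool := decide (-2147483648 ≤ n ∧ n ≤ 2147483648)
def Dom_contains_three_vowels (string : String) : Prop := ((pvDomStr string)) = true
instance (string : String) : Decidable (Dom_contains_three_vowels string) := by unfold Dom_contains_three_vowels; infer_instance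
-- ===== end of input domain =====

-- B replaces A's single early-exit counting scan by five per-vowel string.count scans summed
-- in one expression (objective: simpler); same boolean result.

-- ===== PORT A =====
-- the loop of A: walks the characters, increments on a vowel, returns True as soon as the
-- counter reaches 3, False when the string is exhausted
def ctvLoopA : List Char → Int → Bool
  | [], _ => false
  | char :: rest, numVowels =>
    -- if vowels.__contains__(char): num_vowels += 1   (1-char substring test = membership)
    let numVowels' := if PySem.Str.isIn (String.singleton char) "aeiou" then numVowels + 1 else numVowels
    -- if num_vowels >= 3: return True
    if 3 ≤ numVowels' then true else ctvLoopA rest numVowels'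

def contains_three_vowels (string : String) : Bool :=
  ctvLoopA string.toList 0

-- ===== PORT B =====
def contains_three_vowels_alt (string : String) : Bool :=
  -- sum(string.count(v) for v in 'aeiou') >= 3
  decide (3 ≤ ("aeiou".toList.map (fun v => (PySem.Str.count string (String.singleton v) : Int))).sum)

-- ===== PRECONDITION & SPEC =====
def Spec_contains_three_vowels (string : String) (out : Bool) : Prop := out = contains_three_vowels_alt string
instance (string : String) (out : Bool) : Decidable (Spec_contains_three_vowels string out) := by unfold Spec_contains_three_vowels; infer_instance

-- ===== CLAIM (what is proved, stated in full; the proofs are below) =====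
def Claim_equal_contains_three_vowels : Prop := ∀ (string : String), Dom_contains_three_vowels string → Spec_contains_three_vowels string (contains_three_vowels string)

-- ===== LEMMAS AND PROOFS =====

-- str.count with a one-character needle is plain character count
theorem count_go_singleton (c : Char) (s : List Char) (acc fuel : Nat) (h : s.length ≤ fuel) :
    PySem.Chars.count.go [c] fuel s acc = acc + s.count c := by
  induction s generalizing acc fuel with
  | nil => cases fuel <;> simp [PySem.Chars.count.go]
  | cons a t ih =>
    cases fuel with
    | zero => simp at h
    | succ f =>
      rw [PySem.Chars.count.go]
      by_cases hc : c = a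
      · subst hc
        simp only [List.isPrefixOf, beq_self_eq_true, Bool.true_and,
          if_true, List.length_singleton, List.drop_succ_cons, List.drop_zero]
        rw [ih _ f (by simpa using h)]
        simp
        omega
      · have hp : [c].isPrefixOf (a :: t) = false := by
          simp [List.isPrefixOf]; exact fun h' => hc (h'.symm ▸ rfl)
        simp only [hp, Bool.false_eq_true, ite_false]
        rw [ih _ f (by simpa using h)]
        simp [Ne.symm hc]

theorem count_singleton (s : List Char) (c : Char) :
    PySem.Chars.count s [c] = s.count c := by
  simpa [PySem.Chars.count] using count_go_singleton c s 0 s.length le_rfl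

def isVowel (c : Char) : Bool := ['a', 'e', 'i', 'o', 'u'].contains c

-- the 1-char substring test A performs is the vowel membership test
theorem isIn_singleton_vowels (c : Char) :
    PySem.Str.isIn (String.singleton c) "aeiou" = isVowel c := by
  simp only [PySem.Str.isIn_eq, String.toList_singleton, isVowel]
  by_cases h : c ∈ ['a', 'e', 'i', 'o', 'u']
  · rw [(PySem.Chars.isIn_iff_infix _ _).mpr (by simpa [List.singleton_infix_iff] using h)]
    simpa using h
  · rw [(PySem.Chars.isIn_eq_false_iff _ _).mpr (by simpa [List.singleton_infix_iff] using h)]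
    simpa using h

-- A's loop decides whether the running count ever reaches 3, i.e. whether
-- numVowels + (vowels remaining) ≥ 3, as long as the counter is still below 3
theorem ctvLoopA_eq (l : List Char) (n : Int) (h : n < 3) :
    ctvLoopA l n = decide (3 ≤ n + (l.countP isVowel : Int)) := by
  induction l generalizing n with
  | nil => simp [ctvLoopA]; omega
  | cons c t ih =>
    rw [ctvLoopA]
    simp only [isIn_singleton_vowels]
    by_cases hv : isVowel c
    · simp only [hv, if_true]
      by_cases h3 : 3 ≤ n + 1
      · rw [if_pos h3]
        have : (3:Int) ≤ n + ((c :: t).countP isVowel : Int) := by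
          simp [hv]; omega
        simp [this]
      · rw [if_neg h3, ih (n + 1) (by omega)]
        simp [hv]
        constructor <;> (intro; omega)
    · simp only [hv, Bool.false_eq_true, if_false]
      rw [if_neg (by omega), ih n h]
      simp [hv]

-- B's five per-vowel counts sum to the number of vowel characters
theorem sum_counts_eq (s : List Char) :
    (("aeiou".toList).map (fun v => ((s.count v : Int)))).sum = (s.countP isVowel : Int) := by
  induction s with
  | nil => simp
  | cons c t ih =>
    have key : ∀ v : Char, (c :: t).count v = t.count v + (if c == v then 1 else 0) := by
      intro v; simp [List.count_cons]
    simp only [key, List.countP_cons]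
    by_cases hv : isVowel c
    · have : c = 'a' ∨ c = 'e' ∨ c = 'i' ∨ c = 'o' ∨ c = 'u' := by
        simpa [isVowel] using hv
      rcases this with h | h | h | h | h <;> subst h <;>
        · simp only [hv, if_true]
          simp [List.map, List.sum_cons, ← ih]
          ring
    · have ha : ∀ v ∈ ['a', 'e', 'i', 'o', 'u'], (c == v) = false := by
        intro v hm
        simp only [beq_eq_false_iff_ne]
        intro h; exact hv (by simp [isVowel, h, hm])
      simp only [hv, Bool.false_eq_true, if_false]
      simp only [show "aeiou".toList = ['a','e','i','o','u'] from rfl] at *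
      simp [List.map, List.sum_cons, ha 'a' (by simp), ha 'e' (by simp), ha 'i' (by simp),
        ha 'o' (by simp), ha 'u' (by simp), ← ih]

-- ===== VERDICT (by name: the statement is the Claim_ definition above) =====
theorem contains_three_vowels_spec : Claim_equal_contains_three_vowels := by
  intro string _
  unfold Spec_contains_three_vowels contains_three_vowels contains_three_vowels_alt
  rw [ctvLoopA_eq string.toList 0 (by omega)]
  simp only [PySem.Str.count_eq, String.toList_singleton, count_singleton]
  rw [sum_counts_eq]
  simp
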